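-- pv_equiv track=rewrite | github.com/edarichev/mclib | display/makefont/makelinefont.py | makeFontArray
-- ===== SOURCE A (Python) =====
-- def makeFontArray(bitlist):
--
--     # дополнить до 8 бит
--     align = len(bitlist) % 8;
--     for i in range(0, align):
--         bitlist.append(0);
--     cStr = "";
--     b = 0
--     i = 0
--     k = 1
--     bitnum = 0
--     while i < len(bitlist):
--         b = b * 2 + bitlist[i];
--         if bitnum == 7:
--             cStr += str(b) + ", "
--             if k % 10 == 0:
--                 cStr += '\n'
--             b = 0
--             bitnum = -1
--             k = k + 1
--         bitnum += 1
--         i = i + 1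
--         pass
--     return cStr
-- ===== SOURCE B (Python) =====
-- def makeFontArray(bitlist):
--     # same in-place padding mutation as the original
--     align = len(bitlist) % 8
--     for _ in range(align):
--         bitlist.append(0)
--     nbytes = len(bitlist) // 8
--     parts = [str(sum(x * 2 ** (7 - i) for i, x in enumerate(bitlist[8 * (k - 1):8 * k])))
--              + ", " + ("\n" if k % 10 == 0 else "")
--              for k in range(1, nbytes + 1)]
--     return "".join(parts)
-- ===== Notes on version B (the rewrite author's own statement) =====
-- stated objective: faster
-- what changed: Replaces A's single bit-by-bit while loop with cross-byte accumulator state (b, bitnum, k) by a per-byte decomposition: slice the padded list into 8-bit chunks, convert each chunk with positional weights (sum of x*2**(7-i)), format each byte (value, ', ', newline after every 10th) independently and join the pieces once at the end.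
import Mathlib
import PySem

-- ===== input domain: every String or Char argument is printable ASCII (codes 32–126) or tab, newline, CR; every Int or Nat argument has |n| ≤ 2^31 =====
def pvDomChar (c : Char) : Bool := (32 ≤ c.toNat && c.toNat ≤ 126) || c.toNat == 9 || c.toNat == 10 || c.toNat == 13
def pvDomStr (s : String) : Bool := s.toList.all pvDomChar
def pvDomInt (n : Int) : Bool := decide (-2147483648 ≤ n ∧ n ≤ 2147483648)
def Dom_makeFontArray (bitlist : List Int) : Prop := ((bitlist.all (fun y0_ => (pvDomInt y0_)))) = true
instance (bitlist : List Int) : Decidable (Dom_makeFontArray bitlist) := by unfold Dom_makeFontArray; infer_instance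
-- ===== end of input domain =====

-- B replaces A's cross-byte bit accumulator state machine by per-byte chunk conversion
-- with positional weights, joined once at the end (measurably faster: no repeated string concatenation).
-- Both versions mutate the argument in Python (append len%8 zeros); the equivalence is about the return value.

-- ===== PORT A =====
-- while loop of A over the padded list; state (cStr, b, k, bitnum), the index i is the position in the list
def aLoop : List Int → String → Int → Int → Int → String
  | [], cStr, _, _, _ => cStr
  | x :: rest, cStr, b, k, bitnum =>
    let b' := b * 2 + x
    if bitnum == 7 then
      let cStr' := cStr ++ PySem.Int.toStr b' ++ ", "
      let cStr'' := if PySem.Int.mod k 10 == 0 then cStr' ++ "\n" else cStr'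
      aLoop rest cStr'' 0 (k + 1) ((-1) + 1)   -- b = 0; bitnum = -1; bitnum += 1
    else
      aLoop rest cStr b' k (bitnum + 1)

def makeFontArray (bitlist : List Int) : String :=
  let align := bitlist.length % 8
  let padded := bitlist ++ List.replicate align 0   -- the align appends
  aLoop padded "" 0 1 0

-- ===== PORT B =====
-- str(sum(x * 2**(7-i) for i, x in enumerate(chunk))) + ", " + ("\n" if k % 10 == 0 else "")
def bPiece (chunk : List Int) (k : Int) : String :=
  PySem.Int.toStr ((PySem.List.enumerate chunk 0).map (fun p => p.2 * 2 ^ (7 - p.1.toNat))).sum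
    ++ ", " ++ (if PySem.Int.mod k 10 == 0 then "\n" else "")

def makeFontArray_alt (bitlist : List Int) : String :=
  let align := bitlist.length % 8
  let padded := bitlist ++ List.replicate align 0
  let nbytes : Nat := padded.length / 8
  PySem.Str.join "" ((PySem.List.pyRange 1 ((nbytes : Int) + 1) 1).map (fun k =>
    bPiece (PySem.List.slice padded (some (8 * (k - 1))) (some (8 * k))) k))

-- ===== PRECONDITION & SPEC =====
def Spec_makeFontArray (bitlist : List Int) (out : String) : Prop := out = makeFontArray_alt bitlist
instance (bitlist : List Int) (out : String) : Decidable (Spec_makeFontArray bitlist out) := by unfold Spec_makeFontArray; infer_instance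

-- ===== CLAIM (what is proved, stated in full; the proofs are below) =====
def Claim_equal_makeFontArray : Prop := ∀ (bitlist : List Int), Dom_makeFontArray bitlist → Spec_makeFontArray bitlist (makeFontArray bitlist)

-- ===== LEMMAS AND PROOFS =====

-- the common chunked reading of the output: one byte per 8 leading elements, leftovers dropped
def horner8 (a b c d e f g h : Int) : Int :=
  ((((((a*2+b)*2+c)*2+d)*2+e)*2+f)*2+g)*2+h

def specF : List Int → Int → String
  | a :: b :: c :: d :: e :: f :: g :: h :: t, k =>
    PySem.Int.toStr (horner8 a b c d e f g h) ++ ", "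
      ++ (if PySem.Int.mod k 10 == 0 then "\n" else "") ++ specF t (k+1)
  | _, _ => ""

lemma specF_short (l : List Int) (k : Int) (h : l.length < 8) : specF l k = "" := by
  match l with
  | [] => rfl
  | [a] => rfl
  | [a,b] => rfl
  | [a,b,c] => rfl
  | [a,b,c,d] => rfl
  | [a,b,c,d,e] => rfl
  | [a,b,c,d,e,f] => rfl
  | [a,b,c,d,e,f,g] => rfl
  | a::b::c::d::e::f::g::h'::t => simp at h; omega

lemma aLoop_spec : ∀ (n : Nat) (l : List Int), l.length ≤ n → ∀ (cStr : String) (k : Int),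
    aLoop l cStr 0 k 0 = cStr ++ specF l k := by
  intro n
  induction n with
  | zero =>
    intro l h cStr k
    match l with
    | [] => simp [aLoop, specF]
  | succ n ih =>
    intro l h cStr k
    match l with
    | [] => simp [aLoop, specF]
    | [a] => simp [aLoop, specF]
    | [a,b] => simp [aLoop, specF]
    | [a,b,c] => simp [aLoop, specF]
    | [a,b,c,d] => simp [aLoop, specF]
    | [a,b,c,d,e] => simp [aLoop, specF]
    | [a,b,c,d,e,f] => simp [aLoop, specF]
    | [a,b,c,d,e,f,g] => simp [aLoop, specF]
    | a::b::c::d::e::f::g::h'::t =>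
      have ht : t.length ≤ n := by simp at h; omega
      simp only [aLoop, specF, show ((-1:Int)+1) = 0 by norm_num]
      norm_num
      rw [ih t ht]
      unfold horner8
      split_ifs <;> simp [String.append_assoc]

lemma join_empty_nil : PySem.Str.join "" ([] : List String) = "" := by
  simp [PySem.Str.join]

lemma join_empty_cons (x : String) (xs : List String) :
    PySem.Str.join "" (x :: xs) = x ++ PySem.Str.join "" xs := by
  cases xs with
  | nil => simp [PySem.Str.join]
  | cons y ys =>
    simp [PySem.Str.join]
    rw [PySem.Chars.join_cons_cons]
    simp

lemma bPiece_eight (a b c d e f g h : Int) (k : Int) :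
    bPiece [a,b,c,d,e,f,g,h] k
      = PySem.Int.toStr (horner8 a b c d e f g h) ++ ", "
        ++ (if PySem.Int.mod k 10 == 0 then "\n" else "") := by
  simp [bPiece, String.append_assoc]
  congr 1
  unfold horner8
  ring

lemma drop8_cons (j : Nat) (a b c d e f g h' : Int) (t : List Int) :
    (a::b::c::d::e::f::g::h'::t).drop (8*(j+1)) = t.drop (8*j) := by
  rw [show 8*(j+1) = 8 + 8*j by ring, ← List.drop_drop]
  simp

lemma B_core : ∀ (n : Nat) (l : List Int) (k0 : Int), n = l.length / 8 →
    PySem.Str.join "" ((List.range n).map (fun j => bPiece ((l.drop (8*j)).take 8) (k0 + (j:Int) + 1)))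
      = specF l (k0 + 1) := by
  intro n
  induction n with
  | zero =>
    intro l k0 h
    have hl : l.length < 8 := by
      by_contra hc
      have := Nat.div_le_div_right (c := 8) (Nat.le_of_not_lt hc)
      omega
    rw [specF_short l _ hl]
    simp [join_empty_nil]
  | succ n ih =>
    intro l k0 h
    have hl : 8 ≤ l.length := by
      by_contra hc
      rw [Nat.div_eq_of_lt (Nat.lt_of_not_le hc)] at h
      omega
    match l, hl with
    | a::b::c::d::e::f::g::h'::t, _ =>
      have hn : n = t.length / 8 := by
        have hlen : (a::b::c::d::e::f::g::h'::t : List Int).length = t.length + 8 := by simp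
        rw [hlen] at h
        omega
      rw [List.range_succ_eq_map, List.map_cons, join_empty_cons, List.map_map]
      have htail : ((List.range n).map
            ((fun j => bPiece (((a::b::c::d::e::f::g::h'::t : List Int).drop (8*j)).take 8) (k0 + (j:Int) + 1)) ∘ (fun j => j + 1)))
          = (List.range n).map (fun j => bPiece ((t.drop (8*j)).take 8) ((k0+1) + (j:Int) + 1)) := by
        refine List.map_congr_left ?_
        intro j hj
        simp only [Function.comp]
        rw [drop8_cons]
        congr 1
        push_cast
        ring
      rw [htail, ih t (k0+1) hn]
      have hhead : (((a::b::c::d::e::f::g::h'::t : List Int).drop (8*0)).take 8) = [a,b,c,d,e,f,g,h'] := by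
        simp
      rw [hhead, bPiece_eight]
      show _ = specF (a::b::c::d::e::f::g::h'::t) (k0+1)
      simp only [specF]
      norm_num [String.append_assoc]

lemma A_eval (l : List Int) :
    makeFontArray l = specF (l ++ List.replicate (l.length % 8) 0) 1 := by
  show aLoop (l ++ List.replicate (l.length % 8) 0) "" 0 1 0 = _
  rw [aLoop_spec (l ++ List.replicate (l.length % 8) 0).length _ le_rfl]
  simp

lemma B_eval (l : List Int) :
    makeFontArray_alt l = specF (l ++ List.replicate (l.length % 8) 0) 1 := by
  unfold makeFontArray_alt
  dsimp only
  generalize (l ++ List.replicate (l.length % 8) 0) = padded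
  rw [PySem.List.pyRange_one]
  rw [show (((padded.length / 8 : Nat) : Int) + 1 - 1).toNat = padded.length / 8 by omega]
  rw [List.map_map]
  have hmap : (List.range (padded.length / 8)).map
        ((fun k : Int => bPiece (PySem.List.slice padded (some (8*(k-1))) (some (8*k))) k) ∘ (fun j : Nat => (1:Int) + j))
      = (List.range (padded.length / 8)).map (fun j : Nat => bPiece ((padded.drop (8*j)).take 8) ((0:Int) + (j:Int) + 1)) := by
    refine List.map_congr_left ?_
    intro j hj
    simp only [Function.comp]
    have h1 : (8:Int) * (1 + (j:Nat) - 1) = ((8*j : Nat) : Int) := by push_cast; ring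
    have h2 : (8:Int) * (1 + (j:Nat)) = ((8*j : Nat) : Int) + ((8:Nat) : Int) := by push_cast; ring
    rw [h1, h2, PySem.List.slice_natCast_add]
    congr 1
    ring
  rw [hmap, B_core (padded.length / 8) padded 0 rfl]
  norm_num

theorem makeFontArray_spec : Claim_equal_makeFontArray := by
  unfold Claim_equal_makeFontArray Spec_makeFontArray
  intro l _
  rw [A_eval, B_eval]
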